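-- pv_equiv track=rewrite | github.com/maxthraxx/attnroute | attnroute/context_router.py | compress_warm
-- ===== SOURCE A (Python) =====
-- WARM_COMPRESSION_MAX_CHARS = 2000  # Maximum characters for warm TOC compression
--
-- def compress_warm(content: str, max_chars: int = WARM_COMPRESSION_MAX_CHARS) -> str:
--     """
--     Compress markdown content to TOC-style summary for WARM tier.
--
--     Extracts:
--     - All heading lines (# ## ### etc.)
--     - First 2 non-empty lines after each heading (context lines)
--     - Bullet points at top level (- or * prefixed)
--
--     Target: ~50% size reduction compared to raw header extraction.
--     """
--     lines = content.split('\n')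
--     result = []
--     chars = 0
--     after_heading = 0  # Counter for lines after last heading
--
--     for line in lines:
--         stripped = line.strip()
--
--         # Always include headings
--         if stripped.startswith('#'):
--             if chars + len(line) + 1 > max_chars:
--                 break
--             result.append(line)
--             chars += len(line) + 1
--             after_heading = 0
--             continue
--
--         # Include first 2 non-empty lines after a heading
--         if after_heading < 2 and stripped:
--             if chars + len(line) + 1 > max_chars:
--                 break
--             result.append(line)
--             chars += len(line) + 1
--             after_heading += 1
--             continue
--
--         # Include top-level bullet points
--         if stripped.startswith(('-', '*')) and not stripped.startswith('---'):
--             if chars + len(line) + 1 > max_chars: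
--                 break
--             result.append(line)
--             chars += len(line) + 1
--             continue
--
--     compressed = '\n'.join(result)
--     if len(compressed) < len(content):
--         compressed += "\n\n... [WARM: Compressed TOC, mention to expand] ..."
--     return compressed
-- ===== SOURCE B (Python) =====
-- WARM_COMPRESSION_MAX_CHARS = 2000
--
--
-- def compress_warm(content: str, max_chars: int = WARM_COMPRESSION_MAX_CHARS) -> str:
--     """Two-phase rewrite: first classify which lines belong in the TOC
--     summary, then fill the character budget over that candidate list."""
--     # Phase 1: selection — only the after_heading counter matters here.
--     candidates = []
--     after_heading = 0
--     for line in content.split('\n'):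
--         stripped = line.strip()
--         if stripped.startswith('#'):
--             candidates.append(line)
--             after_heading = 0
--         elif after_heading < 2 and stripped:
--             candidates.append(line)
--             after_heading += 1
--         elif stripped.startswith(('-', '*')) and not stripped.startswith('---'):
--             candidates.append(line)
--     # Phase 2: budget filling — stop at the first line that overflows.
--     kept = []
--     chars = 0
--     for line in candidates:
--         if chars + len(line) + 1 > max_chars:
--             break
--         kept.append(line)
--         chars += len(line) + 1
--     compressed = '\n'.join(kept)
--     if len(compressed) < len(content):
--         compressed += "\n\n... [WARM: Compressed TOC, mention to expand] ..."
--     return compressed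
-- ===== Notes on version B (the rewrite author's own statement) =====
-- stated objective: alternative
-- what changed: Splits A's single interleaved loop into two passes: a selection pass that classifies candidate lines using only the after_heading state, then a separate budget-filling pass that stops at the first overflowing candidate.
import Mathlib
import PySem

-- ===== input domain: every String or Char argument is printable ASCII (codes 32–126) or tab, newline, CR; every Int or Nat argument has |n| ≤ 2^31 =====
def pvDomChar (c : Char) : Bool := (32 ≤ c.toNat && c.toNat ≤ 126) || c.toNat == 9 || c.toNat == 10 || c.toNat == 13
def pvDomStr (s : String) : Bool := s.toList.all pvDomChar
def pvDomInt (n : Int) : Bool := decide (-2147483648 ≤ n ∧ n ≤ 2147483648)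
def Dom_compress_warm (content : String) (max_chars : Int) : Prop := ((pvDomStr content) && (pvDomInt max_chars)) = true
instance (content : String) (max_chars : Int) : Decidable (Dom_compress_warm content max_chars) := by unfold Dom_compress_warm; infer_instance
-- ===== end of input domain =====

-- B splits A's single interleaved loop into a selection pass and a budget-filling pass (alternative decomposition, same cost).

-- ===== PORT A =====
-- A's single for-loop: state (result, chars, after_heading); 'break' returns the accumulated result.
def compressWarmLoopA (max_chars : Int) : List String → List String → Int → Int → List String
  | [], result, _, _ => result
  | line :: rest, result, chars, after_heading =>
    let stripped := PySem.Str.strip line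
    if PySem.Str.startswith stripped "#" = true then
      if chars + PySem.Str.len line + 1 > max_chars then result
      else compressWarmLoopA max_chars rest (result ++ [line]) (chars + PySem.Str.len line + 1) 0
    else if after_heading < 2 ∧ stripped ≠ "" then
      if chars + PySem.Str.len line + 1 > max_chars then result
      else compressWarmLoopA max_chars rest (result ++ [line]) (chars + PySem.Str.len line + 1) (after_heading + 1)
    else if (PySem.Str.startswith stripped "-" = true ∨ PySem.Str.startswith stripped "*" = true)
            ∧ ¬ PySem.Str.startswith stripped "---" = true then
      if chars + PySem.Str.len line + 1 > max_chars then result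
      else compressWarmLoopA max_chars rest (result ++ [line]) (chars + PySem.Str.len line + 1) after_heading
    else compressWarmLoopA max_chars rest result chars after_heading

def compress_warm (content : String) (max_chars : Int) : String :=
  let lines := (PySem.Str.split? content "\n").getD []
  let result := compressWarmLoopA max_chars lines [] 0 0
  let compressed := PySem.Str.join "\n" result
  if PySem.Str.len compressed < PySem.Str.len content then
    compressed ++ "\n\n... [WARM: Compressed TOC, mention to expand] ..."
  else compressed

-- ===== PORT B =====
-- Phase 1: which lines are TOC candidates (only the after_heading state).
def compressWarmSelect : List String → Int → List String
  | [], _ => []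
  | line :: rest, after_heading =>
    let stripped := PySem.Str.strip line
    if PySem.Str.startswith stripped "#" = true then
      line :: compressWarmSelect rest 0
    else if after_heading < 2 ∧ stripped ≠ "" then
      line :: compressWarmSelect rest (after_heading + 1)
    else if (PySem.Str.startswith stripped "-" = true ∨ PySem.Str.startswith stripped "*" = true)
            ∧ ¬ PySem.Str.startswith stripped "---" = true then
      line :: compressWarmSelect rest after_heading
    else compressWarmSelect rest after_heading

-- Phase 2: take candidates until the budget would overflow.
def compressWarmBudget (max_chars : Int) : List String → Int → List String
  | [], _ => []
  | line :: rest, chars =>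
    if chars + PySem.Str.len line + 1 > max_chars then []
    else line :: compressWarmBudget max_chars rest (chars + PySem.Str.len line + 1)

def compress_warm_alt (content : String) (max_chars : Int) : String :=
  let candidates := compressWarmSelect ((PySem.Str.split? content "\n").getD []) 0
  let kept := compressWarmBudget max_chars candidates 0
  let compressed := PySem.Str.join "\n" kept
  if PySem.Str.len compressed < PySem.Str.len content then
    compressed ++ "\n\n... [WARM: Compressed TOC, mention to expand] ..."
  else compressed

-- ===== PRECONDITION & SPEC =====
def Spec_compress_warm (content : String) (max_chars : Int) (out : String) : Prop := out = compress_warm_alt content max_chars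
instance (content : String) (max_chars : Int) (out : String) : Decidable (Spec_compress_warm content max_chars out) := by unfold Spec_compress_warm; infer_instance

-- ===== CLAIM (what is proved, stated in full; the proofs are below) =====
def Claim_equal_compress_warm : Prop := ∀ (content : String) (max_chars : Int), Dom_compress_warm content max_chars → Spec_compress_warm content max_chars (compress_warm content max_chars)

-- ===== LEMMAS AND PROOFS =====
theorem compressWarmLoopA_eq (max_chars : Int) (lines : List String) (result : List String)
    (chars after_heading : Int) :
    compressWarmLoopA max_chars lines result chars after_heading =
      result ++ compressWarmBudget max_chars (compressWarmSelect lines after_heading) chars := by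
  induction lines generalizing result chars after_heading with
  | nil => simp [compressWarmLoopA, compressWarmSelect, compressWarmBudget]
  | cons line rest ih =>
    simp only [compressWarmLoopA, compressWarmSelect]
    split_ifs <;> simp_all [compressWarmBudget]

-- ===== VERDICT (by name: the statement is the Claim_ definition above) =====
theorem compress_warm_spec : Claim_equal_compress_warm := by
  intro content max_chars _
  unfold Spec_compress_warm compress_warm compress_warm_alt
  simp [compressWarmLoopA_eq]
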